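-- pv_equiv track=rewrite | github.com/tu-dortmund-ls12-rt/Segment-Level-Early-Execution | algorithms/list_sched.py | deadline_update
-- ===== SOURCE A (Python) =====
-- import copy
--
-- def deadline_update(task_set):
--     taskset = copy.deepcopy(task_set)
--     deadlines = []
--     # initialize the deadlines for all the sub-tasks using the corresponding period
--     for i in range(len(taskset)):
--         ddl = []
--         ddl_single = taskset[i][-2]
--         for j in range(len(taskset[i])-5):
--             ddl.append(ddl_single)
--         for j in range(len(taskset[i])-7, -1, -1):
--             ddl[j] = ddl[j+1] - taskset[i][j+1]
--         deadlines.append(ddl)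
--     return deadlines
-- ===== SOURCE B (Python) =====
-- def deadline_update(task_set):
--     out = []
--     for task in task_set:
--         d = task[-2]
--         L = len(task) - 5
--         if L <= 0:
--             out.append([])
--             continue
--         # prefix sums of the middle slice task[1:L]
--         pref = [0]
--         for x in task[1:L]:
--             pref.append(pref[-1] + x)
--         total = pref[-1]
--         # deadline j = d - (sum of task[j+1:L]) in closed form via prefix sums
--         out.append([d - (total - pref[j]) for j in range(L)])
--     return out
-- ===== Notes on version B (the rewrite author's own statement) =====
-- stated objective: alternative
-- what changed: Replaces A's backward in-place difference recurrence ddl[j] = ddl[j+1] - task[j+1] by a forward prefix-sum pass over task[1:L] followed by a closed-form per-index computation deadline[j] = ddl_single - (total - pref[j]); no backward pass and no in-place updates.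
import Mathlib
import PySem

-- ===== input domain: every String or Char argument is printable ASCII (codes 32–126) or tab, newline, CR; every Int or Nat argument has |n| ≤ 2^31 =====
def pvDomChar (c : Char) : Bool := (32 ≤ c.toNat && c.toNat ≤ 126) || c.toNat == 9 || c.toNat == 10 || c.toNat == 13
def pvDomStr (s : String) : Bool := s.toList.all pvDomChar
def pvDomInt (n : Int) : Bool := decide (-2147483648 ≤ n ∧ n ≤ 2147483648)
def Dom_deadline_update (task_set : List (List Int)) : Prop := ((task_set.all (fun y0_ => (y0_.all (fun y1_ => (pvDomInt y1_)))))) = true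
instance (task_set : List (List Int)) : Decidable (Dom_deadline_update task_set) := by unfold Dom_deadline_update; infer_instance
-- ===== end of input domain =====

-- B replaces A's backward in-place difference recurrence by a forward prefix-sum pass and a
-- closed-form per-index formula deadline[j] = ddl_single - (total - pref[j]) (alternative, same cost).

-- ===== PORT A =====
def deadline_update (task_set : List (List Int)) : List (List Int) :=
  task_set.foldl (fun deadlines t =>
    -- ddl_single = taskset[i][-2]  (Pre_ guarantees the index is in range)
    let ddl_single := (PySem.List.pyGet? t (-2)).getD 0
    -- for j in range(len(taskset[i])-5): ddl.append(ddl_single)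
    let ddl := (PySem.List.pyRange 0 ((t.length : Int) - 5) 1).foldl
        (fun ddl _ => ddl ++ [ddl_single]) []
    -- for j in range(len(taskset[i])-7, -1, -1): ddl[j] = ddl[j+1] - taskset[i][j+1]
    let ddl := (PySem.List.pyRange ((t.length : Int) - 7) (-1) (-1)).foldl
        (fun ddl j => PySem.List.pySetD ddl j
            (PySem.List.pyGetD ddl (j + 1) 0 - PySem.List.pyGetD t (j + 1) 0)) ddl
    deadlines ++ [ddl]) []

-- ===== PORT B =====
def deadline_update_alt_row (task : List Int) : List Int :=
  let d := (PySem.List.pyGet? task (-2)).getD 0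
  let L := (task.length : Int) - 5
  if L ≤ 0 then []
  else
    -- pref = [0]; for x in task[1:L]: pref.append(pref[-1] + x)
    let pref := (PySem.List.slice task (some 1) (some L)).foldl
        (fun p x => p ++ [(PySem.List.pyGet? p (-1)).getD 0 + x]) [0]
    -- total = pref[-1]
    let total := (PySem.List.pyGet? pref (-1)).getD 0
    -- [d - (total - pref[j]) for j in range(L)]
    (PySem.List.pyRange 0 L 1).map (fun j => d - (total - PySem.List.pyGetD pref j 0))

def deadline_update_alt (task_set : List (List Int)) : List (List Int) :=
  task_set.foldl (fun out t => out ++ [deadline_update_alt_row t]) []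

-- ===== PRECONDITION & SPEC =====
-- Pre_ excludes exactly the inputs where Python A raises IndexError: a row with
-- fewer than 2 elements makes taskset[i][-2] raise.
def Pre_deadline_update (task_set : List (List Int)) : Prop :=
  ∀ t ∈ task_set, 2 ≤ t.length
instance (task_set : List (List Int)) : Decidable (Pre_deadline_update task_set) := by
  unfold Pre_deadline_update; infer_instance

def pvWitness_deadline_update : List (List Int) := [[1, 2, 3, 4, 5, 6, 7], [9, 8]]

def Spec_deadline_update (task_set : List (List Int)) (out : List (List Int)) : Prop := out = deadline_update_alt task_set
instance (task_set : List (List Int)) (out : List (List Int)) : Decidable (Spec_deadline_update task_set out) := by unfold Spec_deadline_update; infer_instance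

-- ===== CLAIM (what is proved, stated in full; the proofs are below) =====
def Claim_equal_deadline_update : Prop := ∀ (task_set : List (List Int)), Dom_deadline_update task_set → Pre_deadline_update task_set → Spec_deadline_update task_set (deadline_update task_set)

-- ===== LEMMAS AND PROOFS =====

-- the intended per-row value: pvF d [x1,…,xk] = [d - (x1+…+xk), …, d - xk, d]
def pvF (d : Int) : List Int → List Int
  | [] => [d]
  | x :: xs => ((pvF d xs).headD 0 - x) :: pvF d xs

-- A's per-row computation, named for the proofs (defeq to the body of A's fold)
def pvArow (t : List Int) : List Int :=
  let ddl_single := (PySem.List.pyGet? t (-2)).getD 0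
  let ddl := (PySem.List.pyRange 0 ((t.length : Int) - 5) 1).foldl
      (fun ddl _ => ddl ++ [ddl_single]) []
  (PySem.List.pyRange ((t.length : Int) - 7) (-1) (-1)).foldl
      (fun ddl j => PySem.List.pySetD ddl j
          (PySem.List.pyGetD ddl (j + 1) 0 - PySem.List.pyGetD t (j + 1) 0)) ddl

theorem pvHeadD_pvF (d : Int) (m : List Int) (x : Int) :
    pvF d (x :: m) = ((pvF d m).headD 0 - x) :: pvF d m := rfl

theorem pvF_headD (d : Int) (m : List Int) : (pvF d m).headD 0 = d - m.sum := by
  induction m with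
  | nil => simp [pvF]
  | cons x xs ih => rw [pvHeadD_pvF, List.headD_cons, ih, List.sum_cons]; ring

-- closed form for pvF via prefix sums
theorem pvF_eq_map (d : Int) (m : List Int) :
    pvF d m = (List.range (m.length + 1)).map (fun j => d - (m.sum - (m.take j).sum)) := by
  induction m with
  | nil => simp [pvF]
  | cons x xs ih =>
    rw [pvHeadD_pvF, pvF_headD, List.length_cons, List.range_succ_eq_map, List.map_cons,
      List.map_map, ih]
    refine List.cons_eq_cons.mpr ⟨by rw [List.sum_cons, List.take_zero, List.sum_nil, sub_zero]; ring, ?_⟩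
    apply List.map_congr_left
    intro j _
    simp [List.take_succ_cons]

-- the init loop builds a replicate
theorem pvInit_foldl (d : Int) : ∀ (l : List Int) (acc : List Int),
    l.foldl (fun r (_ : Int) => r ++ [d]) acc = acc ++ List.replicate l.length d := by
  intro l
  induction l with
  | nil => simp
  | cons x xs ih =>
    intro acc
    rw [List.foldl_cons, ih, List.append_assoc, List.singleton_append, ← List.replicate_succ,
      List.length_cons]

theorem pvInit (d : Int) (n : Int) :
    (PySem.List.pyRange 0 n 1).foldl (fun r (_ : Int) => r ++ [d]) [] =
      List.replicate n.toNat d := by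
  rw [pvInit_foldl]
  simp [PySem.List.length_pyRange_one]

-- A's backward update loop, run from j = L-1-k up (as a foldr), computes pvF on the
-- last k middle elements of t
theorem pvLoopA (t : List Int) (d : Int) (L : Nat) (hL : L + 5 ≤ t.length) (h1 : 1 ≤ L) :
    ∀ k : Nat, k ≤ L - 1 →
      (PySem.List.pyRange ((L : Int) - 1 - k) ((L : Int) - 1) 1).foldr
        (fun j ddl => PySem.List.pySetD ddl j
            (PySem.List.pyGetD ddl (j + 1) 0 - PySem.List.pyGetD t (j + 1) 0))
        (List.replicate L d)
      = List.replicate (L - 1 - k) d ++ pvF d ((t.drop (L - k)).take k) := by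
  intro k
  induction k with
  | zero =>
    intro _
    rw [PySem.List.pyRange_one_eq_nil (by omega)]
    simp [pvF]
    rw [← List.replicate_succ']
    congr 1
    omega
  | succ k ih =>
    intro hk
    have hki := ih (by omega)
    rw [PySem.List.pyRange_one_cons (by omega)]
    rw [List.foldr_cons]
    have hstep : (L : Int) - 1 - (k + 1 : Nat) + 1 = (L : Int) - 1 - k := by omega
    rw [hstep, hki]
    have e1 : ((L : Int) - 1 - (k + 1 : Nat)) = ((L - 2 - k : Nat) : Int) := by push_cast; omega
    have e2 : ((L : Int) - 1 - (k : Nat)) = ((L - 1 - k : Nat) : Int) := by omega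
    rw [e1, e2, PySem.List.pySetD_natCast, PySem.List.pyGetD_natCast, PySem.List.pyGetD_natCast]
    have hlen : L - 1 - k < t.length := by omega
    have hx : (List.replicate (L - 1 - k) d ++ pvF d ((t.drop (L - k)).take k)).getD (L - 1 - k) 0
        = (pvF d ((t.drop (L - k)).take k)).headD 0 := by
      rw [List.getD_eq_getElem?_getD, List.getElem?_append_right (by simp)]
      simp [List.headD_eq_head?_getD, List.head?_eq_getElem?]
    have ht : t.getD (L - 1 - k) 0 = t[L - 1 - k] := List.getD_eq_getElem t 0 hlen
    have hm : (t.drop (L - (k + 1))).take (k + 1)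
        = t[L - 1 - k] :: (t.drop (L - k)).take k := by
      have h3 : L - (k + 1) = L - 1 - k := by omega
      have h5 : L - 1 - k + 1 = L - k := by omega
      rw [h3, List.drop_eq_getElem_cons hlen, h5, List.take_succ_cons]
    rw [hx, ht, hm, pvHeadD_pvF]
    rw [show List.replicate (L - 1 - k) d = List.replicate (L - 2 - k) d ++ [d] by
          rw [← List.replicate_succ']; congr 1; omega]
    rw [List.append_assoc, List.set_append]
    simp only [List.length_replicate]
    rw [if_neg (by omega)]
    rw [show L - 2 - k - (L - 2 - k) = 0 by omega]
    have h4 : L - 1 - (k + 1) = L - 2 - k := by omega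
    rw [h4]
    rfl

-- A's row equals pvF on the middle slice
theorem pvArow_eq (t : List Int) (L : Nat) (hlen : t.length = L + 5) (h1 : 1 ≤ L) :
    pvArow t = pvF ((PySem.List.pyGet? t (-2)).getD 0) ((t.drop 1).take (L - 1)) := by
  unfold pvArow
  simp only [pvInit]
  set d := (PySem.List.pyGet? t (-2)).getD 0 with hd
  have hcast : ((t.length : Int) - 5).toNat = L := by omega
  have h7 : (t.length : Int) - 7 = ((L : Int) - 2) := by omega
  rw [hcast, h7, PySem.List.pyRange_neg_one_eq_reverse]
  rw [show ((-1 : Int) + 1) = 0 from by ring, show ((L : Int) - 2 + 1) = (L : Int) - 1 from by ring]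
  rw [List.foldl_reverse]
  have hloop := pvLoopA t d L (by omega) h1 (L - 1) le_rfl
  rw [show ((L : Int) - 1 - ((L - 1 : Nat) : Int)) = 0 from by omega] at hloop
  rw [show L - 1 - (L - 1) = 0 from by omega, show L - (L - 1) = 1 from by omega] at hloop
  simp only [List.replicate_zero, List.nil_append] at hloop
  exact hloop

-- B's prefix-sum loop, characterized: appends the running sums of m shifted by s
theorem pvFoldPref : ∀ (m p : List Int) (s : Int),
    (PySem.List.pyGet? p (-1)).getD 0 = s →
    m.foldl (fun p x => p ++ [(PySem.List.pyGet? p (-1)).getD 0 + x]) p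
      = p ++ (List.range m.length).map (fun j => s + (m.take (j + 1)).sum) := by
  intro m
  induction m with
  | nil => intro p s _; simp
  | cons x xs ih =>
    intro p s hs
    rw [List.foldl_cons, hs]
    rw [ih (p ++ [s + x]) (s + x)
      (by rw [PySem.List.pyGet?_neg_one_append_singleton]; rfl)]
    rw [List.length_cons, List.range_succ_eq_map, List.map_cons, List.map_map,
      List.append_assoc, List.singleton_append]
    congr 2
    · simp
    · apply List.map_congr_left
      intro j _
      simp
      ring

-- B's prefix list equals the map of prefix sums over range
theorem pvPrefChar (m : List Int) :
    m.foldl (fun p x => p ++ [(PySem.List.pyGet? p (-1)).getD 0 + x]) [0]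
      = (List.range (m.length + 1)).map (fun j => (m.take j).sum) := by
  rw [pvFoldPref m [0] 0 rfl]
  rw [List.range_succ_eq_map, List.map_cons, List.map_map, List.singleton_append]
  congr 1
  apply List.map_congr_left
  intro j _
  simp

-- pref[-1] is the total sum
theorem pvPrefLast (m : List Int) :
    (PySem.List.pyGet? ((List.range (m.length + 1)).map (fun j => (m.take j).sum)) (-1)).getD 0
      = m.sum := by
  rw [PySem.List.pyGet?_neg_one, List.range_succ, List.map_append, List.map_cons, List.map_nil,
    List.getLast?_concat]
  simp


-- ===== VERDICT helper: per-row equality =====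
theorem pvRow_eq (t : List Int) : pvArow t = deadline_update_alt_row t := by
  unfold deadline_update_alt_row
  by_cases h5 : (t.length : Int) - 5 ≤ 0
  · rw [if_pos h5]
    unfold pvArow
    rw [PySem.List.pyRange_one_eq_nil (by omega), PySem.List.pyRange_neg_one_eq_nil (by omega)]
    rfl
  · rw [if_neg h5]
    set d := (PySem.List.pyGet? t (-2)).getD 0 with hd
    set L := t.length - 5 with hLdef
    have hlen : t.length = L + 5 := by omega
    have h1 : 1 ≤ L := by omega
    rw [pvArow_eq t L hlen h1]
    set m := (t.drop 1).take (L - 1) with hm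
    have hmlen : m.length = L - 1 := by
      rw [hm]; simp; omega
    -- the slice is m
    have hLc : (t.length : Int) - 5 = ((L : Nat) : Int) := by omega
    rw [hLc, PySem.List.slice_toNat _ (by omega) (by omega)]
    simp only [Int.toNat_one, Int.toNat_natCast]
    rw [← hm]
    rw [pvPrefChar m, pvPrefLast m]
    show pvF d m = _
    rw [show ((L : Nat) : Int) = (((m.length + 1 : Nat)) : Int) from by omega]
    rw [PySem.List.pyRange_zero_natCast, List.map_map, pvF_eq_map]
    apply List.map_congr_left
    intro j hj
    rw [List.mem_range] at hj
    simp only [Function.comp_apply, PySem.List.pyGetD_natCast]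
    rw [List.getD_eq_getElem _ _ (by simp; omega), List.getElem_map, List.getElem_range]

theorem pvFoldl_map (f : List Int → List Int) : ∀ (ts : List (List Int)) (acc : List (List Int)),
    ts.foldl (fun r t => r ++ [f t]) acc = acc ++ ts.map f := by
  intro ts
  induction ts with
  | nil => simp
  | cons t ts ih => intro acc; rw [List.foldl_cons, ih, List.map_cons, List.append_assoc,
      List.singleton_append]

-- ===== VERDICT (by name: the statement is the Claim_ definition above) =====
theorem deadline_update_spec : Claim_equal_deadline_update := by
  intro ts _ _
  unfold Spec_deadline_update
  have hA : deadline_update ts = ts.foldl (fun r t => r ++ [pvArow t]) [] := rfl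
  have hB : deadline_update_alt ts = ts.foldl (fun r t => r ++ [deadline_update_alt_row t]) [] := rfl
  rw [hA, hB, pvFoldl_map, pvFoldl_map, List.nil_append, List.nil_append]
  exact List.map_congr_left (fun t _ => pvRow_eq t)
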